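-- pv_equiv track=rewrite | github.com/shllvii/SyGuS-3days | src/synthBV.py | genShiftR
-- ===== SOURCE A (Python) =====
-- def genShiftR(shiftW, length):
--     if (shiftW == 0):
--         return 'x'
--     elif (shiftW >= 16):
--         return '(shr16 ' + genShiftR(shiftW - 16, length) + ')'
--     elif (shiftW >= 4):
--         return '(shr4 ' + genShiftR(shiftW - 4, length) + ')'
--     else:
--         return '(shr1 ' + genShiftR(shiftW - 1, length) + ')'
-- ===== SOURCE B (Python) =====
-- def genShiftR(shiftW, length):
--     n16, rem = divmod(shiftW, 16)
--     n4, n1 = divmod(rem, 4)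
--     return ('(shr16 ' * n16 + '(shr4 ' * n4 + '(shr1 ' * n1
--             + 'x' + ')' * (n16 + n4 + n1))
-- ===== Notes on version B (the rewrite author's own statement) =====
-- stated objective: alternative
-- what changed: Replaces the recursive peel-16/4/1 descent with a closed-form divmod count of each wrapper kind and direct string repetition (no recursion; intended as faster, measured 18.9x at the largest size A finished but A hit the recursion limit on larger inputs so a timing run could not confirm it).
import Mathlib
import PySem

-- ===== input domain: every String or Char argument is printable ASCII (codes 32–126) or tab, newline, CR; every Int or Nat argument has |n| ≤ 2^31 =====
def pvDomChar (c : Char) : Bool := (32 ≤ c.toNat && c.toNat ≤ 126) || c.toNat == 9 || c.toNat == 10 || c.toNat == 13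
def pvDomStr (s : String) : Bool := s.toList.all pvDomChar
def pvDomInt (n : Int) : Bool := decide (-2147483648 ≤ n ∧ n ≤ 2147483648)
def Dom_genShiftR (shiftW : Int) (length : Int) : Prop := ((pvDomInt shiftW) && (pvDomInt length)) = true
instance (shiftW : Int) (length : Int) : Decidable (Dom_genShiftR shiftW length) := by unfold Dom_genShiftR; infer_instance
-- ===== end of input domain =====

-- B replaces A's recursive peel-16/4/1 descent by a closed-form divmod count of each
-- shift wrapper plus direct string repetition (objective: alternative, non-recursive).


-- ===== PORT A =====
-- literal port of A's recursion; the final 'else ""' is only a totality guard for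
-- shiftW < 0, where the Python recurses without bound (outside Pre_).
def genShiftR (shiftW : Int) (length : Int) : String :=
  if shiftW = 0 then "x"
  else if 16 ≤ shiftW then "(shr16 " ++ genShiftR (shiftW - 16) length ++ ")"
  else if 4 ≤ shiftW then "(shr4 " ++ genShiftR (shiftW - 4) length ++ ")"
  else if 0 < shiftW then "(shr1 " ++ genShiftR (shiftW - 1) length ++ ")"
  else ""
termination_by shiftW.toNat
decreasing_by all_goals omega

-- ===== PORT B =====
-- Python's  s * n  on strings (empty for n ≤ 0)
def strRep (s : String) (n : Int) : String := String.ofList (PySem.List.pyRepeat s.toList n)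

def genShiftR_alt (shiftW : Int) (length : Int) : String :=
  let n16 := PySem.Int.floordiv shiftW 16
  let rem := PySem.Int.mod shiftW 16
  let n4 := PySem.Int.floordiv rem 4
  let n1 := PySem.Int.mod rem 4
  strRep "(shr16 " n16 ++ strRep "(shr4 " n4 ++ strRep "(shr1 " n1
    ++ "x" ++ strRep ")" (n16 + n4 + n1)

-- ===== PRECONDITION & SPEC =====
-- Pre_ excludes shiftW < 0, on which the Python A recurses forever (RecursionError).
def Pre_genShiftR (shiftW : Int) (length : Int) : Prop := 0 ≤ shiftW
instance (shiftW : Int) (length : Int) : Decidable (Pre_genShiftR shiftW length) := by unfold Pre_genShiftR; infer_instance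
def pvWitness_genShiftR : Int × Int := (23, 8)

def Spec_genShiftR (shiftW : Int) (length : Int) (out : String) : Prop := out = genShiftR_alt shiftW length
instance (shiftW : Int) (length : Int) (out : String) : Decidable (Spec_genShiftR shiftW length out) := by unfold Spec_genShiftR; infer_instance

-- ===== CLAIM (what is proved, stated in full; the proofs are below) =====
def Claim_equal_genShiftR : Prop := ∀ (shiftW : Int) (length : Int), Dom_genShiftR shiftW length → Pre_genShiftR shiftW length → Spec_genShiftR shiftW length (genShiftR shiftW length)

-- ===== LEMMAS AND PROOFS =====

theorem strRep_zero (s : String) : strRep s 0 = "" := by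
  rfl

theorem strRep_succ (s : String) (n : Int) (h : 0 ≤ n) :
    strRep s (n + 1) = s ++ strRep s n := by
  have : (n + 1).toNat = n.toNat + 1 := by omega
  simp [strRep, PySem.List.pyRepeat, this, List.replicate_succ, String.ofList_append]

theorem strRep_succ' (s : String) (n : Int) (h : 0 ≤ n) :
    strRep s (n + 1) = strRep s n ++ s := by
  have : (n + 1).toNat = n.toNat + 1 := by omega
  simp [strRep, PySem.List.pyRepeat, this, List.replicate_succ', String.ofList_append]

-- closed-form B satisfies A's three unfolding equations on nonnegative input
theorem alt_zero (l : Int) : genShiftR_alt 0 l = "x" := rfl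

theorem alt_16 (s l : Int) (h : 16 ≤ s) :
    genShiftR_alt s l = "(shr16 " ++ genShiftR_alt (s - 16) l ++ ")" := by
  simp only [genShiftR_alt]
  rw [PySem.Int.floordiv_eq_ediv_of_pos (by omega : (0:Int) < 16),
      PySem.Int.floordiv_eq_ediv_of_pos (by omega : (0:Int) < 16),
      PySem.Int.mod_eq_emod_of_pos (by omega : (0:Int) < 16),
      PySem.Int.mod_eq_emod_of_pos (by omega : (0:Int) < 16)]
  have hd : s / 16 = (s - 16) / 16 + 1 := by omega
  have hm : s % 16 = (s - 16) % 16 := by omega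
  have hdn : 0 ≤ (s - 16) / 16 := by omega
  have hrem : 0 ≤ (s - 16) % 16 := by omega
  have h4 : 0 ≤ PySem.Int.floordiv ((s - 16) % 16) 4 := by
    rw [PySem.Int.floordiv_eq_ediv_of_pos (by omega : (0:Int) < 4)]; positivity
  have h1 : 0 ≤ PySem.Int.mod ((s - 16) % 16) 4 := PySem.Int.mod_nonneg _ (by omega)
  rw [hd, hm, strRep_succ _ _ hdn]
  have hsum : (s - 16) / 16 + 1 + PySem.Int.floordiv ((s - 16) % 16) 4
      + PySem.Int.mod ((s - 16) % 16) 4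
      = ((s - 16) / 16 + PySem.Int.floordiv ((s - 16) % 16) 4
        + PySem.Int.mod ((s - 16) % 16) 4) + 1 := by ring
  rw [hsum, strRep_succ' _ _ (by omega)]
  simp [String.append_assoc]

theorem alt_4 (s l : Int) (h4 : 4 ≤ s) (h16 : s < 16) :
    genShiftR_alt s l = "(shr4 " ++ genShiftR_alt (s - 4) l ++ ")" := by
  simp only [genShiftR_alt]
  rw [PySem.Int.floordiv_eq_ediv_of_pos (by omega : (0:Int) < 16),
      PySem.Int.floordiv_eq_ediv_of_pos (by omega : (0:Int) < 16),
      PySem.Int.mod_eq_emod_of_pos (by omega : (0:Int) < 16),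
      PySem.Int.mod_eq_emod_of_pos (by omega : (0:Int) < 16),
      PySem.Int.floordiv_eq_ediv_of_pos (by omega : (0:Int) < 4),
      PySem.Int.floordiv_eq_ediv_of_pos (by omega : (0:Int) < 4),
      PySem.Int.mod_eq_emod_of_pos (by omega : (0:Int) < 4),
      PySem.Int.mod_eq_emod_of_pos (by omega : (0:Int) < 4)]
  have e16 : s / 16 = 0 ∧ (s - 4) / 16 = 0 := by omega
  have em : s % 16 = s ∧ (s - 4) % 16 = s - 4 := by omega
  have ed : s / 4 = (s - 4) / 4 + 1 := by omega
  have em4 : s % 4 = (s - 4) % 4 := by omega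
  have hn4 : 0 ≤ (s - 4) / 4 := by omega
  have hn1 : 0 ≤ (s - 4) % 4 := by omega
  rw [e16.1, e16.2, em.1, em.2, ed, em4, strRep_succ _ _ hn4]
  have hsum : (0:Int) + ((s - 4) / 4 + 1) + (s - 4) % 4
      = (0 + (s - 4) / 4 + (s - 4) % 4) + 1 := by ring
  rw [hsum, strRep_succ' _ _ (by omega)]
  simp [strRep_zero, String.append_assoc]

theorem alt_1 (s l : Int) (h1 : 1 ≤ s) (h4 : s < 4) :
    genShiftR_alt s l = "(shr1 " ++ genShiftR_alt (s - 1) l ++ ")" := by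
  simp only [genShiftR_alt]
  rw [PySem.Int.floordiv_eq_ediv_of_pos (by omega : (0:Int) < 16),
      PySem.Int.floordiv_eq_ediv_of_pos (by omega : (0:Int) < 16),
      PySem.Int.mod_eq_emod_of_pos (by omega : (0:Int) < 16),
      PySem.Int.mod_eq_emod_of_pos (by omega : (0:Int) < 16),
      PySem.Int.floordiv_eq_ediv_of_pos (by omega : (0:Int) < 4),
      PySem.Int.floordiv_eq_ediv_of_pos (by omega : (0:Int) < 4),
      PySem.Int.mod_eq_emod_of_pos (by omega : (0:Int) < 4),
      PySem.Int.mod_eq_emod_of_pos (by omega : (0:Int) < 4)]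
  have e16 : s / 16 = 0 ∧ (s - 1) / 16 = 0 := by omega
  have em : s % 16 = s ∧ (s - 1) % 16 = s - 1 := by omega
  have e4 : s / 4 = 0 ∧ (s - 1) / 4 = 0 := by omega
  have em1 : s % 4 = (s - 1) % 4 + 1 := by omega
  have hn1 : 0 ≤ (s - 1) % 4 := by omega
  rw [e16.1, e16.2, em.1, em.2, e4.1, e4.2, em1, strRep_succ _ _ hn1]
  have hsum : (0:Int) + 0 + ((s - 1) % 4 + 1) = (0 + 0 + (s - 1) % 4) + 1 := by ring
  rw [hsum, strRep_succ' _ _ (by omega)]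
  simp [strRep_zero, String.append_assoc]

theorem genShiftR_eq_alt (s l : Int) (h : 0 ≤ s) : genShiftR s l = genShiftR_alt s l := by
  induction hn : s.toNat using Nat.strong_induction_on generalizing s with
  | _ n ih =>
    rw [genShiftR]
    by_cases h0 : s = 0
    · simp [h0, alt_zero]
    · by_cases h16 : 16 ≤ s
      · rw [if_neg h0, if_pos h16, ih (s - 16).toNat (by omega) _ (by omega) rfl,
            alt_16 s l h16]
      · by_cases h4 : 4 ≤ s
        · rw [if_neg h0, if_neg h16, if_pos h4,
              ih (s - 4).toNat (by omega) _ (by omega) rfl, alt_4 s l h4 (by omega)]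
        · rw [if_neg h0, if_neg h16, if_neg h4, if_pos (by omega : 0 < s),
              ih (s - 1).toNat (by omega) _ (by omega) rfl,
              alt_1 s l (by omega) (by omega)]

-- ===== VERDICT (by name: the statement is the Claim_ definition above) =====
theorem genShiftR_spec : Claim_equal_genShiftR := by
  intro s l _ hpre
  exact genShiftR_eq_alt s l hpre
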